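-- pv_equiv track=rewrite | github.com/eetuahon/aoc20 | d14.py | masked
-- ===== SOURCE A (Python) =====
-- def masked(string):
--     bl = []
--     wh = []
--     x = []
--     for i in range(len(string)):
--         if string[i] == "1":
--             bl.append(i)
--         elif string[i] == "0":
--             wh.append(i)
--         else:
--             x.append(i)
--     return (bl, wh, x)
-- ===== SOURCE B (Python) =====
-- def masked(string):
--     pairs = list(enumerate(string))
--     bl = [i for i, c in pairs if c == "1"]
--     wh = [i for i, c in pairs if c == "0"]
--     x = [i for i, c in pairs if c != "1" and c != "0"]
--     return (bl, wh, x)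
-- ===== Notes on version B (the rewrite author's own statement) =====
-- stated objective: idiomatic
-- what changed: Replaces the single index-loop with three mutable accumulators by three independent list comprehensions over enumerate(string), one per bucket.
import Mathlib
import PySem

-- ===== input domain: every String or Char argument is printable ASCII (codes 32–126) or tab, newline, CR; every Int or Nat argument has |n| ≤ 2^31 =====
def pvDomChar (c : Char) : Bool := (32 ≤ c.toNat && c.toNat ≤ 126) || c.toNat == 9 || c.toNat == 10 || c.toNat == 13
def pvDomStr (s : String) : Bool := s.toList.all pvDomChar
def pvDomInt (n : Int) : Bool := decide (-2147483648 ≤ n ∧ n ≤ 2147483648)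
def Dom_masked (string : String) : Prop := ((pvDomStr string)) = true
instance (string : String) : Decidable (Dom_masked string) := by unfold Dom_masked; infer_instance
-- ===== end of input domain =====

-- B replaces A's single index-loop with three independent comprehensions over enumerate (idiomatic decomposition).

-- ===== PORT A =====
-- literal port of A: loop i over range(len(string)), indexing string[i], appending to one of three accumulators
def masked (string : String) : List Int × List Int × List Int :=
  let cs := string.toList
  (PySem.List.pyRange 0 (PySem.List.len cs) 1).foldl
    (fun (acc : List Int × List Int × List Int) i =>
      let c := PySem.List.pyGetD cs i ' '   -- i is always in range, default never used
      if c = '1' then (acc.1 ++ [i], acc.2.1, acc.2.2)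
      else if c = '0' then (acc.1, acc.2.1 ++ [i], acc.2.2)
      else (acc.1, acc.2.1, acc.2.2 ++ [i]))
    ([], [], [])

-- ===== PORT B =====
-- literal port of B: three filtered passes over enumerate(string)
def masked_alt (string : String) : List Int × List Int × List Int :=
  let pairs := PySem.List.enumerate string.toList 0
  (((pairs.filter (fun p => p.2 = '1')).map (fun p => p.1)),
   ((pairs.filter (fun p => p.2 = '0')).map (fun p => p.1)),
   ((pairs.filter (fun p => p.2 ≠ '1' ∧ p.2 ≠ '0')).map (fun p => p.1)))

-- ===== PRECONDITION & SPEC =====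
def Spec_masked (string : String) (out : List Int × List Int × List Int) : Prop := out = masked_alt string
instance (string : String) (out : List Int × List Int × List Int) : Decidable (Spec_masked string out) := by unfold Spec_masked; infer_instance

-- ===== CLAIM (what is proved, stated in full; the proofs are below) =====
def Claim_equal_masked : Prop := ∀ (string : String), Dom_masked string → Spec_masked string (masked string)

-- ===== LEMMAS AND PROOFS =====

-- the loop of A, run over enumerate with any starting accumulators, appends B's three filtered lists
theorem masked_fold_enum (cs : List Char) (n : Int) (bl wh x : List Int) :
    (PySem.List.enumerate cs n).foldl
      (fun (acc : List Int × List Int × List Int) (p : Int × Char) =>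
        if p.2 = '1' then (acc.1 ++ [p.1], acc.2.1, acc.2.2)
        else if p.2 = '0' then (acc.1, acc.2.1 ++ [p.1], acc.2.2)
        else (acc.1, acc.2.1, acc.2.2 ++ [p.1]))
      (bl, wh, x)
    = (bl ++ (((PySem.List.enumerate cs n).filter (fun p => p.2 = '1')).map (fun p => p.1)),
       wh ++ (((PySem.List.enumerate cs n).filter (fun p => p.2 = '0')).map (fun p => p.1)),
       x ++ (((PySem.List.enumerate cs n).filter (fun p => p.2 ≠ '1' ∧ p.2 ≠ '0')).map (fun p => p.1))) := by
  induction cs generalizing n bl wh x with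
  | nil => simp [PySem.List.enumerate_nil]
  | cons c cs ih =>
    rw [PySem.List.enumerate_cons]
    by_cases h1 : c = '1'
    · simp [h1, List.foldl_cons, ih]
    · by_cases h0 : c = '0'
      · simp [h0, List.foldl_cons, ih]
      · simp [h1, h0, List.foldl_cons, ih]

-- ===== VERDICT (by name: the statement is the Claim_ definition above) =====
theorem masked_spec : Claim_equal_masked := by
  intro s _
  unfold Spec_masked masked masked_alt
  have h := masked_fold_enum s.toList 0 [] [] []
  rw [PySem.List.enumerate_eq_map_pyRange s.toList ' '] at h
  simp only [List.foldl_map] at h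
  simpa [PySem.List.enumerate_eq_map_pyRange s.toList ' '] using h
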